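-- pv_equiv track=rewrite | github.com/uree/linqr | app/bibjson_methods.py | resolve_depth_new
-- ===== SOURCE A (Python) =====
-- def resolve_depth_new(pod, level):
--     depth = ''
--     for i in pod:
--         #print i
--         for k, v in i.items():
--             #print k, v
--             for s in v:
--                 #print s
--                 if s['level'] == level:
--                     depth = s['depth']
--     return depth
-- ===== SOURCE B (Python) =====
-- def resolve_depth_new(pod, level):
--     # Reverse-order early-exit search: first match in fully reversed
--     # traversal == last match of the forward scan; same '' default.
--     for i in reversed(pod):
--         for k, v in reversed(list(i.items())):
--             for s in reversed(v):
--                 if s['level'] == level: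
--                     return s['depth']
--     return ''
-- ===== Notes on version B (the rewrite author's own statement) =====
-- stated objective: alternative
-- what changed: Replaces the exhaustive last-wins accumulator scan by an early-exit search over the fully reversed three-level nesting, returning the first reverse-order match immediately.
import Mathlib
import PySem

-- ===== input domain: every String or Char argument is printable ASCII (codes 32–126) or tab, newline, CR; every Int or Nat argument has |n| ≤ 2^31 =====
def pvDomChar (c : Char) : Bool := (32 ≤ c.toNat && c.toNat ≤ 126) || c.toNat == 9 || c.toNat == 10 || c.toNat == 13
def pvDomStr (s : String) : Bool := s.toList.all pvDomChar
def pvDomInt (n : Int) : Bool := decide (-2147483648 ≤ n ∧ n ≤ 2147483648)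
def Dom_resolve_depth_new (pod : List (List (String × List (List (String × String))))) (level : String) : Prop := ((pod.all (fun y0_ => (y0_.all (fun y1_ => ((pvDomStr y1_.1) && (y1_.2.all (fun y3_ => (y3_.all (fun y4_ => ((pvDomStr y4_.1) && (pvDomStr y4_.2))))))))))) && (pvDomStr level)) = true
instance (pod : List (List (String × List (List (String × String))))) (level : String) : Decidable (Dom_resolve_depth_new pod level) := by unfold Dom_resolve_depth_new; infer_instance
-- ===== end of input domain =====

-- B replaces A's exhaustive last-wins accumulator scan by an early-exit search
-- over the fully reversed three-level nesting (alternative decomposition, same cost).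

-- ===== PORT A =====
-- dict lookup (first match in the association list) for the inner dicts
def stepS (level : String) (depth : String) (s : List (String × String)) : String :=
  if List.lookup "level" s = some level then (List.lookup "depth" s).getD "" else depth

def resolve_depth_new (pod : List (List (String × List (List (String × String))))) (level : String) : String :=
  pod.foldl (fun depth i =>
    i.foldl (fun depth kv =>
      kv.2.foldl (stepS level) depth) depth) ""

-- ===== PORT B =====
-- for s in reversed(v): return s['depth'] on first match
def altFindV (level : String) : List (List (String × String)) → Option String
  | [] => none
  | s :: rest =>
    if List.lookup "level" s = some level then some ((List.lookup "depth" s).getD "")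
    else altFindV level rest

-- for k, v in reversed(list(i.items()))
def altFindI (level : String) : List (String × List (List (String × String))) → Option String
  | [] => none
  | kv :: rest =>
    match altFindV level kv.2.reverse with
    | some d => some d
    | none => altFindI level rest

-- for i in reversed(pod)
def altFindP (level : String) : List (List (String × List (List (String × String)))) → Option String
  | [] => none
  | i :: rest =>
    match altFindI level i.reverse with
    | some d => some d
    | none => altFindP level rest

def resolve_depth_new_alt (pod : List (List (String × List (List (String × String))))) (level : String) : String :=
  (altFindP level pod.reverse).getD ""

-- ===== PRECONDITION & SPEC =====
-- Pre_ excludes exactly the inputs on which A raises KeyError: some inner dict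
-- lacks the 'level' key, or matches level but lacks the 'depth' key.
def Pre_resolve_depth_new (pod : List (List (String × List (List (String × String))))) (level : String) : Prop :=
  ∀ i ∈ pod, ∀ kv ∈ i, ∀ s ∈ kv.2,
    (List.lookup "level" s).isSome = true ∧
    (List.lookup "level" s = some level → (List.lookup "depth" s).isSome = true)
instance (pod : List (List (String × List (List (String × String))))) (level : String) : Decidable (Pre_resolve_depth_new pod level) := by unfold Pre_resolve_depth_new; infer_instance

def pvWitness_resolve_depth_new : (List (List (String × List (List (String × String))))) × String :=
  ([[("a", [[("level", "x"), ("depth", "2")]])]], "x")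

def Spec_resolve_depth_new (pod : List (List (String × List (List (String × String))))) (level : String) (out : String) : Prop := out = resolve_depth_new_alt pod level
instance (pod : List (List (String × List (List (String × String))))) (level : String) (out : String) : Decidable (Spec_resolve_depth_new pod level out) := by unfold Spec_resolve_depth_new; infer_instance

-- ===== CLAIM (what is proved, stated in full; the proofs are below) =====
def Claim_equal_resolve_depth_new : Prop := ∀ (pod : List (List (String × List (List (String × String))))) (level : String), Dom_resolve_depth_new pod level → Pre_resolve_depth_new pod level → Spec_resolve_depth_new pod level (resolve_depth_new pod level)

-- ===== LEMMAS AND PROOFS =====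

-- inner level: forward foldl over v = reverse first-match with default
theorem foldl_stepS_rev (level : String) :
    ∀ (w : List (List (String × String))) (d : String),
      w.reverse.foldl (stepS level) d = (altFindV level w).getD d := by
  intro w
  induction w with
  | nil => intro d; simp [altFindV]
  | cons s rest ih =>
    intro d
    simp only [List.reverse_cons, List.foldl_append, List.foldl_cons, List.foldl_nil, altFindV]
    split
    next h => simp [stepS, h]
    next h => simp [stepS, h, ih]

theorem foldl_stepS (level : String) (v : List (List (String × String))) (d : String) :
    v.foldl (stepS level) d = (altFindV level v.reverse).getD d := by
  have h := foldl_stepS_rev level v.reverse d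
  rwa [List.reverse_reverse] at h

-- middle level
theorem foldl_stepI_rev (level : String) :
    ∀ (w : List (String × List (List (String × String)))) (d : String),
      w.reverse.foldl (fun depth kv => kv.2.foldl (stepS level) depth) d
        = (altFindI level w).getD d := by
  intro w
  induction w with
  | nil => intro d; simp [altFindI]
  | cons kv rest ih =>
    intro d
    simp only [List.reverse_cons, List.foldl_append, List.foldl_cons, List.foldl_nil, altFindI]
    rw [foldl_stepS]
    cases altFindV level kv.2.reverse with
    | some x => simp
    | none => simp [ih]

theorem foldl_stepI (level : String) (i : List (String × List (List (String × String)))) (d : String) :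
    i.foldl (fun depth kv => kv.2.foldl (stepS level) depth) d = (altFindI level i.reverse).getD d := by
  have h := foldl_stepI_rev level i.reverse d
  rwa [List.reverse_reverse] at h

-- outer level
theorem foldl_stepP_rev (level : String) :
    ∀ (w : List (List (String × List (List (String × String))))) (d : String),
      w.reverse.foldl (fun depth i => i.foldl (fun depth kv => kv.2.foldl (stepS level) depth) depth) d
        = (altFindP level w).getD d := by
  intro w
  induction w with
  | nil => intro d; simp [altFindP]
  | cons i rest ih =>
    intro d
    simp only [List.reverse_cons, List.foldl_append, List.foldl_cons, List.foldl_nil, altFindP]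
    rw [foldl_stepI]
    cases altFindI level i.reverse with
    | some x => simp
    | none => simp [ih]

-- ===== VERDICT (by name: the statement is the Claim_ definition above) =====
theorem resolve_depth_new_spec : Claim_equal_resolve_depth_new := by
  intro pod level _ _
  unfold Spec_resolve_depth_new resolve_depth_new resolve_depth_new_alt
  have h := foldl_stepP_rev level pod.reverse ""
  rwa [List.reverse_reverse] at h
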